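-- pv_equiv track=rewrite | github.com/prabhupant/daily-coding-problem | Data Structures/Hash/MinimumOperation.py | minOp
-- ===== SOURCE A (Python) =====
-- def minOp(arr, n):
--
--     dict = {}
--     for num in arr:
--         if num in dict:
--             dict[num] += 1
--         else:
--             dict[num] = 1
--
--     s = set(dict)
--     max_count = 0
--     for num in s:
--         if max_count < dict[num]:
--             max_count = dict[num]
--
--     return n - max_count
-- ===== SOURCE B (Python) =====
-- def minOp(arr, n):
--     # sort a copy, then one scan tracking the longest run of equal neighbours
--     best = 0
--     run = 0
--     prev = None
--     for x in sorted(arr):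
--         if x == prev:
--             run += 1
--         else:
--             run = 1
--             prev = x
--         if run > best:
--             best = run
--     return n - best
-- ===== Notes on version B (the rewrite author's own statement) =====
-- stated objective: alternative
-- what changed: Replaces the hash-count dict plus a second max-scan over the key set by sorting a copy of the array and one scan that tracks the longest run of equal consecutive elements.
import Mathlib
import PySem

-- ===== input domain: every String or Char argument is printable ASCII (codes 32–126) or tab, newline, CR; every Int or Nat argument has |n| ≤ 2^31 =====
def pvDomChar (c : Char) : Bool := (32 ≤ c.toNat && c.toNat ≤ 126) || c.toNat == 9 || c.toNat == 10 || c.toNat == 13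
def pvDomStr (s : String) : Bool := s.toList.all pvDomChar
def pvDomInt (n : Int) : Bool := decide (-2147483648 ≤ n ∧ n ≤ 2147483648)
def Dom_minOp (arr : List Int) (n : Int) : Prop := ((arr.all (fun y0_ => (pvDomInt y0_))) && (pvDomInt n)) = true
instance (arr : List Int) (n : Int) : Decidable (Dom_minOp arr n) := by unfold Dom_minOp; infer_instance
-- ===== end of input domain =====

-- B replaces A's hash-count dict + max-scan over the key set by sorting a copy
-- of the array and one scan tracking the longest run of equal neighbours
-- (alternative algorithm, same return value; neither mutates arr).

-- ===== PORT A =====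
def minOp (arr : List Int) (n : Int) : Int :=
  -- dict = {}; for num in arr: count occurrences
  let d := arr.foldl
    (fun d num =>
      if d.contains num then d.insert num (d.getD num 0 + 1) else d.insert num 1)
    PySem.Dict.empty
  -- s = set(dict)  (set of the keys; consumed order-independently below)
  let s : PySem.Set Int := PySem.Set.ofList d.keys
  -- max_count loop over s
  let max_count := s.foldl
    (fun max_count num => if max_count < d.getD num 0 then d.getD num 0 else max_count) 0
  n - max_count

-- ===== PORT B =====
-- one iteration of Source B's loop body, state (best, run, prev)
def minOpStep (st : Int × Int × Option Int) (x : Int) : Int × Int × Option Int :=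
  if some x = st.2.2 then
    (if st.2.1 + 1 > st.1 then st.2.1 + 1 else st.1, st.2.1 + 1, st.2.2)
  else
    (if (1 : Int) > st.1 then 1 else st.1, 1, some x)

def minOp_alt (arr : List Int) (n : Int) : Int :=
  let st := (PySem.List.sorted arr (fun x => x) false).foldl minOpStep (0, 0, none)
  n - st.1

-- ===== PRECONDITION & SPEC =====
def Spec_minOp (arr : List Int) (n : Int) (out : Int) : Prop := out = minOp_alt arr n
instance (arr : List Int) (n : Int) (out : Int) : Decidable (Spec_minOp arr n out) := by unfold Spec_minOp; infer_instance

-- ===== CLAIM (what is proved, stated in full; the proofs are below) =====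
def Claim_equal_minOp : Prop := ∀ (arr : List Int) (n : Int), Dom_minOp arr n → Spec_minOp arr n (minOp arr n)

-- ===== LEMMAS AND PROOFS =====

-- max of a list of Ints, floored at 0
def pvF (l : List Int) : Int := l.foldl max 0

-- max over occurrences of each element's count, with r extra occurrences of a credited
def pvG (t : List Int) (a r : Int) : Int :=
  pvF (t.map (fun v => ((t.count v : Int) + if v = a then r else 0)))

def pvM (s : List Int) : Int := pvF (s.map (fun v => (s.count v : Int)))

lemma pv_foldl_max_max (l : List Int) : ∀ a b : Int, l.foldl max (max a b) = max a (l.foldl max b) := by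
  induction l with
  | nil => intro a b; rfl
  | cons x t ih =>
    intro a b
    simp only [List.foldl_cons]
    rw [max_assoc, ih]

lemma pvF_cons (e : Int) (l : List Int) : pvF (e :: l) = max e (pvF l) := by
  simp only [pvF, List.foldl_cons]
  rw [max_comm, pv_foldl_max_max]

lemma pvF_nonneg (l : List Int) : 0 ≤ pvF l := (PySem.List.le_foldl_max l 0).1

lemma pvF_le_of_mem {l : List Int} {x : Int} (h : x ∈ l) : x ≤ pvF l :=
  (PySem.List.le_foldl_max l 0).2 x h

lemma pvF_mem_or_zero (l : List Int) : pvF l = 0 ∨ pvF l ∈ l :=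
  PySem.List.foldl_max_mem l 0

lemma pvF_eq_of_mem_iff {l l' : List Int} (h : ∀ x, x ∈ l ↔ x ∈ l') : pvF l = pvF l' := by
  apply le_antisymm
  · rcases pvF_mem_or_zero l with h0 | hm
    · rw [h0]; exact pvF_nonneg l'
    · exact pvF_le_of_mem ((h _).mp hm)
  · rcases pvF_mem_or_zero l' with h0 | hm
    · rw [h0]; exact pvF_nonneg l
    · exact pvF_le_of_mem ((h _).mpr hm)

-- unfolding pvG at a cons whose head is the credited element
lemma pvG_cons_self (x : Int) (t : List Int) (r : Int) :
    pvG (x :: t) x r = max ((t.count x : Int) + 1 + r) (pvG t x (r + 1)) := by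
  unfold pvG
  rw [List.map_cons, pvF_cons]
  have h2 : t.map (fun v => (((x :: t).count v : Int) + if v = x then r else 0))
      = t.map (fun v => ((t.count v : Int) + if v = x then r + 1 else 0)) := by
    apply List.map_congr_left
    intro v hv
    by_cases hvx : v = x
    · subst hvx
      rw [List.count_cons_self, if_pos rfl, if_pos rfl]; push_cast; ring
    · rw [List.count_cons_of_ne (show x ≠ v from fun h => hvx h.symm), if_neg hvx, if_neg hvx]
  rw [h2]
  congr 1
  rw [List.count_cons_self, if_pos rfl]
  push_cast; ring

-- unfolding pvG at a cons whose head differs from the credited element, which is absent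
lemma pvG_cons_ne (x a : Int) (t : List Int) (r : Int) (hxa : x ≠ a) (hat : a ∉ t) :
    pvG (x :: t) a r = max ((t.count x : Int) + 1) (pvG t x 1) := by
  unfold pvG
  rw [List.map_cons, pvF_cons]
  have h2 : t.map (fun v => (((x :: t).count v : Int) + if v = a then r else 0))
      = t.map (fun v => ((t.count v : Int) + if v = x then 1 else 0)) := by
    apply List.map_congr_left
    intro v hv
    have hva : v ≠ a := fun h => hat (h ▸ hv)
    by_cases hvx : v = x
    · subst hvx
      rw [List.count_cons_self, if_neg hva, if_pos rfl]; push_cast; ring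
    · rw [List.count_cons_of_ne (show x ≠ v from fun h => hvx h.symm), if_neg hva, if_neg hvx]
  rw [h2]
  congr 1
  rw [List.count_cons_self, if_neg hxa]
  push_cast; ring

lemma pvM_cons (x : Int) (t : List Int) :
    pvM (x :: t) = max ((t.count x : Int) + 1) (pvG t x 1) := by
  unfold pvM
  rw [List.map_cons, pvF_cons]
  have h2 : t.map (fun v => (((x :: t).count v : Int)))
      = t.map (fun v => ((t.count v : Int) + if v = x then 1 else 0)) := by
    apply List.map_congr_left
    intro v hv
    by_cases hvx : v = x
    · subst hvx
      rw [List.count_cons_self, if_pos rfl]; push_cast; ring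
    · rw [List.count_cons_of_ne (show x ≠ v from fun h => hvx h.symm), if_neg hvx]; ring
  rw [h2]
  congr 1
  rw [List.count_cons_self]
  push_cast; ring

-- when the credited element occurs, its credited count is below pvG
lemma count_le_pvG {t : List Int} {x : Int} (hx : x ∈ t) (r : Int) :
    (t.count x : Int) + r ≤ pvG t x r := by
  have hm : ((t.count x : Int) + if x = x then r else 0)
      ∈ t.map (fun v => ((t.count v : Int) + if v = x then r else 0)) :=
    List.mem_map.mpr ⟨x, hx, rfl⟩
  have := pvF_le_of_mem hm
  simpa using this

lemma pvG_nonneg (t : List Int) (a r : Int) : 0 ≤ pvG t a r := pvF_nonneg _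

-- the loop of B on a sorted tail, with state (b, run = r, prev = some a)
lemma scanGen (t : List Int) : ∀ b r a : Int,
    t.Pairwise (· ≤ ·) → (∀ y ∈ t, a ≤ y) → 1 ≤ r → r ≤ b →
    (t.foldl minOpStep (b, r, some a)).1 = max b (pvG t a r) := by
  induction t with
  | nil =>
    intro b r a _ _ h1 hrb
    simp only [List.foldl_nil]
    show b = max b (pvG [] a r)
    rw [show pvG [] a r = (0 : Int) from rfl, max_eq_left (by omega)]
  | cons x t ih =>
    intro b r a hpw hle h1 hrb
    obtain ⟨hx, hpt⟩ := List.pairwise_cons.mp hpw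
    have hax : a ≤ x := hle x (.head _)
    simp only [List.foldl_cons]
    by_cases hxa : x = a
    · subst hxa
      have hstep : minOpStep (b, r, some x) x = (max b (r + 1), r + 1, some x) := by
        have hdef : minOpStep (b, r, some x) x
            = if some x = some x then (if r + 1 > b then r + 1 else b, r + 1, some x)
              else (if (1 : Int) > b then 1 else b, 1, some x) := rfl
        rw [hdef, if_pos rfl]
        by_cases hgt : r + 1 > b
        · rw [if_pos hgt, max_eq_right (by omega)]
        · rw [if_neg hgt, max_eq_left (by omega)]
      rw [hstep, ih (max b (r + 1)) (r + 1) x hpt hx (by omega) (le_max_right _ _),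
        pvG_cons_self]
      by_cases hxt : x ∈ t
      · have hc := count_le_pvG hxt (r + 1)
        have h0 : (0:Int) ≤ (t.count x : Int) := Int.natCast_nonneg _
        simp only [max_def]
        split_ifs <;> omega
      · have hc : t.count x = 0 := List.count_eq_zero.mpr hxt
        rw [hc]
        simp only [max_def]
        split_ifs <;> omega
    · have hne : ¬ (some x = some a) := by simpa using hxa
      have hstep : minOpStep (b, r, some a) x = (b, 1, some x) := by
        have hdef : minOpStep (b, r, some a) x
            = if some x = some a then (if r + 1 > b then r + 1 else b, r + 1, some a)
              else (if (1 : Int) > b then 1 else b, 1, some x) := rfl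
        rw [hdef, if_neg hne, if_neg (show ¬ ((1:Int) > b) by omega)]
      have haxlt : a < x := lt_of_le_of_ne hax (fun h => hxa h.symm)
      have hat : a ∉ t := fun h => absurd (hx a h) (by omega)
      rw [hstep, ih b 1 x hpt hx le_rfl (by omega), pvG_cons_ne x a t r hxa hat]
      by_cases hxt : x ∈ t
      · have hc := count_le_pvG hxt 1
        have h0 : (0:Int) ≤ (t.count x : Int) := Int.natCast_nonneg _
        simp only [max_def]
        split_ifs <;> omega
      · have hc : t.count x = 0 := List.count_eq_zero.mpr hxt
        rw [hc]
        have hg := pvG_nonneg t x 1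
        simp only [max_def]
        split_ifs <;> omega

-- B computes n minus the maximal multiplicity
lemma alt_eq (arr : List Int) (n : Int) : minOp_alt arr n = n - pvM arr := by
  simp only [minOp_alt]
  rcases hs : PySem.List.sorted arr (fun x => x) false with _ | ⟨x, t⟩
  · have harr : arr = [] := (PySem.List.sorted_eq_nil_iff _ _ _).mp hs
    subst harr
    simp [pvM, pvF]
  · have hperm : (x :: t).Perm arr := hs ▸ PySem.List.sorted_perm arr (fun x => x) false
    have hpw : (x :: t).Pairwise (· ≤ ·) := by
      have := PySem.List.sorted_pairwise arr (fun x => x)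
      rw [hs] at this
      exact this
    obtain ⟨hx, hpt⟩ := List.pairwise_cons.mp hpw
    have hstep : minOpStep (0, 0, (none : Option Int)) x = (1, 1, some x) := by
      have hdef : minOpStep (0, 0, (none : Option Int)) x
          = if some x = (none : Option Int) then ((if (0:Int) + 1 > 0 then 0 + 1 else 0, 0 + 1, (none : Option Int)))
            else (if (1 : Int) > 0 then 1 else 0, 1, some x) := rfl
      rw [hdef, if_neg (Option.some_ne_none x), if_pos one_pos]
    rw [List.foldl_cons, hstep, scanGen t 1 1 x hpt hx le_rfl le_rfl]
    have hMs : max 1 (pvG t x 1) = pvM (x :: t) := by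
      rw [pvM_cons]
      by_cases hxt : x ∈ t
      · have hc := count_le_pvG hxt 1
        have h0 : (0:Int) ≤ (t.count x : Int) := Int.natCast_nonneg _
        simp only [max_def]
        split_ifs <;> omega
      · have hc : t.count x = 0 := List.count_eq_zero.mpr hxt
        rw [hc]
        simp
    rw [hMs]
    have hMM : pvM (x :: t) = pvM arr := by
      apply pvF_eq_of_mem_iff
      intro z
      simp only [List.mem_map]
      constructor
      · rintro ⟨v, hv, rfl⟩
        exact ⟨v, hperm.mem_iff.mp hv, by rw [hperm.count_eq]⟩
      · rintro ⟨v, hv, rfl⟩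
        exact ⟨v, hperm.mem_iff.mpr hv, by rw [hperm.count_eq]⟩
    rw [hMM]

-- A computes n minus the maximal multiplicity
lemma a_eq (arr : List Int) (n : Int) : minOp arr n = n - pvM arr := by
  have hd : arr.foldl
      (fun d num =>
        if d.contains num then d.insert num (d.getD num 0 + 1) else d.insert num 1)
      PySem.Dict.empty = PySem.Dict.counter arr := by
    have hcongr := PySem.List.foldl_congr_mem
      (l := arr) (init := (PySem.Dict.empty : PySem.Dict Int Int))
      (f := fun (d : PySem.Dict Int Int) num =>
        if d.contains num then d.insert num (d.getD num 0 + 1) else d.insert num 1)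
      (g := fun (d : PySem.Dict Int Int) x => d.insert x (d.getD x 0 + 1))
      (by
        intro acc x _
        by_cases hc : acc.contains x
        · simp [hc]
        · have h0 : acc.getD x 0 = 0 :=
            PySem.Dict.getD_of_not_contains acc 0 (by simpa using hc)
          simp [hc, h0])
    rw [hcongr]
    exact PySem.Dict.foldl_insert_getD_add_one_eq_counter arr
  simp only [minOp]
  rw [hd, PySem.Dict.keys_counter, PySem.Set.ofList_ofList]
  have hbody : (PySem.Set.ofList arr).foldl
      (fun max_count num =>
        if max_count < (PySem.Dict.counter arr).getD num 0 then (PySem.Dict.counter arr).getD num 0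
        else max_count) 0
      = (PySem.Set.ofList arr).foldl (fun acc v => max acc ((arr.count v : Int))) 0 := by
    apply PySem.List.foldl_congr_mem
    intro acc v _
    rw [PySem.Dict.getD_counter]
    rcases lt_or_ge acc ((arr.count v : Int)) with h | h
    · rw [if_pos h, max_eq_right h.le]
    · rw [if_neg (not_lt.mpr h), max_eq_left h]
  rw [hbody, ← List.foldl_map]
  have hmm : pvF ((PySem.Set.ofList arr).map (fun v => (arr.count v : Int))) = pvM arr := by
    apply pvF_eq_of_mem_iff
    intro z
    simp only [List.mem_map]
    constructor
    · rintro ⟨v, hv, rfl⟩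
      exact ⟨v, (PySem.Set.mem_ofList _ _).mp hv, rfl⟩
    · rintro ⟨v, hv, rfl⟩
      exact ⟨v, (PySem.Set.mem_ofList _ _).mpr hv, rfl⟩
  rw [show ((PySem.Set.ofList arr).map (fun v => (arr.count v : Int))).foldl max 0
      = pvF ((PySem.Set.ofList arr).map (fun v => (arr.count v : Int))) from rfl, hmm]

-- ===== VERDICT (by name: the statement is the Claim_ definition above) =====
theorem minOp_spec : Claim_equal_minOp := by
  intro arr n _
  unfold Spec_minOp
  rw [a_eq, alt_eq]
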